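-- pv_equiv track=rewrite | github.com/andrewglowrance/dj-lighting | backend/lighting/cue_engine.py | _resolve_groups
-- ===== SOURCE A (Python) =====
-- def _resolve_groups(
--     requested: list[str],
--     groups: dict,
--     fallback_map: dict[str, str | None],
--     empty_groups: list[str],
-- ) -> list[str]:
--     """
--     For each requested group:
--       - If it has fixtures → keep it.
--       - If it's empty and has a fallback → substitute the fallback.
--       - If it's empty with no fallback → omit it.
--     Returns the de-duplicated resolved list, or [] if nothing survives.
--     """
--     resolved: list[str] = []
--     seen: set[str] = set()
--
--     for group in requested:
--         if group not in empty_groups: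
--             # Group has fixtures; keep as-is
--             if group not in seen:
--                 resolved.append(group)
--                 seen.add(group)
--         else:
--             # Empty group — try fallback
--             fallback = fallback_map.get(group)
--             if fallback and fallback not in seen and fallback not in empty_groups:
--                 resolved.append(fallback)
--                 seen.add(fallback)
--             # else: omit
--
--     return resolved
-- ===== SOURCE B (Python) =====
-- def _resolve_groups(
--     requested: list[str],
--     groups: dict,
--     fallback_map: dict[str, str | None],
--     empty_groups: list[str],
-- ) -> list[str]:
--     # Build the answer BACK-TO-FRONT: walk the requests in reverse, resolve each
--     # one, prepend it and drop any later duplicate by filtering the accumulator.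
--     # First occurrences win automatically: a later duplicate already in the
--     # accumulator is filtered out when the earlier occurrence is prepended.
--     resolved: list[str] = []
--     for group in reversed(requested):
--         if group not in empty_groups:
--             cand = group
--         else:
--             fb = fallback_map.get(group)
--             cand = fb if fb and fb not in empty_groups else None
--         if cand is not None:
--             resolved = [cand] + [x for x in resolved if x != cand]
--     return resolved
-- ===== Notes on version B (the rewrite author's own statement) =====
-- stated objective: alternative
-- what changed: B replaces A's forward single pass with a shared seen-set by a reverse traversal that builds the result back-to-front with no dedup state at all: each resolved candidate is prepended and later duplicates are removed by filtering the accumulator, so first occurrences win by construction.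
import Mathlib
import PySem

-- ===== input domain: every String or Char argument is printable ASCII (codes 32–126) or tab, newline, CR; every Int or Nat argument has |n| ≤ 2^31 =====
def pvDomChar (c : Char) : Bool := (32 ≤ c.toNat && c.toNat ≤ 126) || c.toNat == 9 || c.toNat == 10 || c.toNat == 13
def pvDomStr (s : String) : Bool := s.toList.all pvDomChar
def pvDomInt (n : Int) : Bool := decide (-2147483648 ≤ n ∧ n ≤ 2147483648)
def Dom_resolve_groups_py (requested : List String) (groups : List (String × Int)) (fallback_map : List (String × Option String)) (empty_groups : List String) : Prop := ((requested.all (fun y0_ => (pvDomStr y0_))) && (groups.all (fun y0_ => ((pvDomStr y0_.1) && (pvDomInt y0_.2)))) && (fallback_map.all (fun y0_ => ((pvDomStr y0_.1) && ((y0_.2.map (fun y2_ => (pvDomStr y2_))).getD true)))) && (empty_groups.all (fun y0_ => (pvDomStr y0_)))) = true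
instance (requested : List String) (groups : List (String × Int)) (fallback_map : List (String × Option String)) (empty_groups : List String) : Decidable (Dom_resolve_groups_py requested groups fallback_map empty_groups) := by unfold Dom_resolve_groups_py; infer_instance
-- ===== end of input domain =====

-- B builds the result back-to-front over reversed(requested) with no seen-set: each candidate is prepended and later duplicates are filtered out of the accumulator (objective: alternative).

-- ===== PORT A =====
-- literal transliteration of A: one forward loop carrying (resolved, seen : set)
def resolve_groups_py (requested : List String) (groups : List (String × Int)) (fallback_map : List (String × Option String)) (empty_groups : List String) : List String :=
  (requested.foldl (fun (st : List String × PySem.Set String) group =>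
    if group ∉ empty_groups then
      if group ∉ st.2 then (st.1 ++ [group], PySem.Set.add st.2 group) else st
    else
      match ((PySem.Dict.mk fallback_map).get? group).getD none with
      | some fallback =>
        if fallback ≠ "" ∧ fallback ∉ st.2 ∧ fallback ∉ empty_groups then
          (st.1 ++ [fallback], PySem.Set.add st.2 fallback)
        else st
      | none => st) ([], PySem.Set.empty)).1

-- ===== PORT B =====
-- literal transliteration of B: reversed iteration ('for group in reversed(requested)'
-- = List.foldr), no seen state; each candidate is prepended and later duplicates are
-- removed by filtering the accumulator
def resolve_groups_py_alt (requested : List String) (groups : List (String × Int)) (fallback_map : List (String × Option String)) (empty_groups : List String) : List String :=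
  requested.foldr (fun group resolved =>
    let cand : Option String :=
      if group ∉ empty_groups then some group
      else
        match ((PySem.Dict.mk fallback_map).get? group).getD none with
        | some fb => if fb ≠ "" ∧ fb ∉ empty_groups then some fb else none
        | none => none
    match cand with
    | none => resolved
    | some c => c :: resolved.filter (fun x => x != c)) []

-- ===== PRECONDITION & SPEC =====
def Spec_resolve_groups_py (requested : List String) (groups : List (String × Int)) (fallback_map : List (String × Option String)) (empty_groups : List String) (out : List String) : Prop := out = resolve_groups_py_alt requested groups fallback_map empty_groups
instance (requested : List String) (groups : List (String × Int)) (fallback_map : List (String × Option String)) (empty_groups : List String) (out : List String) : Decidable (Spec_resolve_groups_py requested groups fallback_map empty_groups out) := by unfold Spec_resolve_groups_py; infer_instance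

-- ===== CLAIM (what is proved, stated in full; the proofs are below) =====
def Claim_equal_resolve_groups_py : Prop := ∀ (requested : List String) (groups : List (String × Int)) (fallback_map : List (String × Option String)) (empty_groups : List String), Dom_resolve_groups_py requested groups fallback_map empty_groups → Spec_resolve_groups_py requested groups fallback_map empty_groups (resolve_groups_py requested groups fallback_map empty_groups)

-- ===== LEMMAS AND PROOFS =====

-- the per-element resolution both programs perform
def pvCand (fallback_map : List (String × Option String)) (empty_groups : List String) (group : String) : Option String :=
  if group ∉ empty_groups then some group
  else
    match ((PySem.Dict.mk fallback_map).get? group).getD none with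
    | some fallback =>
      if fallback ≠ "" ∧ fallback ∉ empty_groups then some fallback else none
    | none => none

-- A's loop from a state with equal components keeps them equal and acts as Set.add of each candidate
theorem pvA_loop (fallback_map : List (String × Option String)) (empty_groups : List String) :
    ∀ (xs : List String) (res : PySem.Set String),
    xs.foldl (fun (st : List String × PySem.Set String) group =>
      if group ∉ empty_groups then
        if group ∉ st.2 then (st.1 ++ [group], PySem.Set.add st.2 group) else st
      else
        match ((PySem.Dict.mk fallback_map).get? group).getD none with
        | some fallback =>
          if fallback ≠ "" ∧ fallback ∉ st.2 ∧ fallback ∉ empty_groups then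
            (st.1 ++ [fallback], PySem.Set.add st.2 fallback)
          else st
        | none => st) (res, res)
    = (let r := (xs.filterMap (pvCand fallback_map empty_groups)).foldl PySem.Set.add res; (r, r)) := by
  intro xs
  induction xs with
  | nil => intro res; rfl
  | cons g xs ih =>
    intro res
    simp only [List.foldl_cons, List.filterMap_cons]
    by_cases hg : g ∈ empty_groups
    · cases hfb : ((PySem.Dict.mk fallback_map).get? g).getD none with
      | none => simpa [pvCand, hg, hfb] using ih res
      | some f =>
        by_cases hf : f ≠ "" ∧ f ∉ empty_groups
        · by_cases hs : f ∈ res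
          · have hd : pvCand fallback_map empty_groups g = some f := by
              simp [pvCand, hg, hfb, hf]
            have hadd : PySem.Set.add res f = res := by simp [PySem.Set.add, hs]
            simp only [hd, Option.some.injEq, hg, not_true_eq_false, if_false, hfb,
              List.filterMap_cons]
            rw [if_neg (by simp [hs, hf])]
            simpa [hadd] using ih res
          · have hd : pvCand fallback_map empty_groups g = some f := by
              simp [pvCand, hg, hfb, hf]
            have hadd : PySem.Set.add res f = res ++ [f] := by simp [PySem.Set.add, hs]
            simp only [hd, hg, not_true_eq_false, if_false, hfb]
            rw [if_pos ⟨hf.1, hs, hf.2⟩]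
            simpa [hadd] using ih (PySem.Set.add res f)
        · have hd : pvCand fallback_map empty_groups g = none := by
            simp only [pvCand, hg, not_true_eq_false, if_false, hfb]
            rw [if_neg hf]
          have : ¬ (f ≠ "" ∧ f ∉ res ∧ f ∉ empty_groups) := by
            intro h; exact hf ⟨h.1, h.2.2⟩
          simp only [hd, hg, not_true_eq_false, if_false, hfb]
          rw [if_neg this]
          simpa using ih res
    · have hd : pvCand fallback_map empty_groups g = some g := by simp [pvCand, hg]
      by_cases hs : g ∈ res
      · have hadd : PySem.Set.add res g = res := by simp [PySem.Set.add, hs]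
        simp only [hd, hg, not_false_eq_true, if_true]
        rw [if_neg (by simp [hs])]
        simpa [hadd] using ih res
      · have hadd : PySem.Set.add res g = res ++ [g] := by simp [PySem.Set.add, hs]
        simp only [hd, hg, not_false_eq_true, if_true]
        rw [if_pos hs]
        simpa [hadd] using ih (PySem.Set.add res g)

-- filtering out one element commutes with the Set.add fold
theorem pv_filter_foldl (x : String) :
    ∀ (xs s : List String),
    (xs.foldl PySem.Set.add s).filter (fun y => y != x)
      = (xs.filter (fun y => y != x)).foldl PySem.Set.add (s.filter (fun y => y != x)) := by
  intro xs
  induction xs with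
  | nil => intro s; simp
  | cons g xs ih =>
    intro s
    by_cases hg : g = x
    · subst hg
      have hadd : (PySem.Set.add s g).filter (fun y => y != g) = s.filter (fun y => y != g) := by
        by_cases hm : g ∈ s <;> simp [PySem.Set.add, hm]
      simp only [List.foldl_cons, List.filter_cons, bne_self_eq_false, if_false]
      rw [ih, hadd]
      simp
    · have hadd : (PySem.Set.add s g).filter (fun y => y != x)
          = PySem.Set.add (s.filter (fun y => y != x)) g := by
        have hmem : g ∈ s.filter (fun y => y != x) ↔ g ∈ s := by
          simp [List.mem_filter, hg]
        by_cases hm : g ∈ s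
        · simp [PySem.Set.add, hm, hmem.mpr hm]
        · simp [PySem.Set.add, hm, fun h => hm (hmem.mp h), hg]
      simp only [List.foldl_cons, List.filter_cons]
      rw [if_pos (by simp [hg]), ih, hadd]
      simp
-- occurrences of an element already in the state are skipped by the fold
theorem pv_skip (x : String) :
    ∀ (xs s : List String), x ∈ s →
    xs.foldl PySem.Set.add s = (xs.filter (fun y => y != x)).foldl PySem.Set.add s := by
  intro xs
  induction xs with
  | nil => intro s _; rfl
  | cons g xs ih =>
    intro s hx
    by_cases hg : g = x
    · subst hg
      have : PySem.Set.add s g = s := by simp [PySem.Set.add, hx]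
      simp only [List.foldl_cons, List.filter_cons, bne_self_eq_false, if_false, this]
      exact ih s hx
    · have hx' : x ∈ PySem.Set.add s g := by
        by_cases hm : g ∈ s <;> simp [PySem.Set.add, hm, hx]
      simp only [List.foldl_cons, List.filter_cons]
      rw [if_pos (by simp [hg])]
      simp only [List.foldl_cons]
      exact ih _ hx'

-- a head element absent from the rest stays in front of the fold
theorem pv_cons_state (x : String) :
    ∀ (ys s : List String), x ∉ ys →
    ys.foldl PySem.Set.add (x :: s) = x :: ys.foldl PySem.Set.add s := by
  intro ys
  induction ys with
  | nil => intro s _; rfl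
  | cons g ys ih =>
    intro s hx
    have hgx : g ≠ x := fun h => hx (h ▸ List.mem_cons_self ..)
    have hadd : PySem.Set.add (x :: s) g = x :: PySem.Set.add s g := by
      by_cases hm : g ∈ s <;> simp [PySem.Set.add, hm, hgx]
    simp only [List.foldl_cons, hadd]
    exact ih _ (fun h => hx (List.mem_cons_of_mem _ h))

-- first-occurrence dedup, one step
theorem pv_ofList_cons (c : String) (cs : List String) :
    PySem.Set.ofList (c :: cs) = c :: PySem.Set.ofList (cs.filter (fun y => y != c)) := by
  have h1 : PySem.Set.ofList (c :: cs) = cs.foldl PySem.Set.add [c] := by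
    simp [PySem.Set.ofList_eq_foldl, PySem.Set.add, PySem.Set.empty]
  rw [h1, pv_skip c cs [c] (by simp),
    pv_cons_state c _ [] (by simp), PySem.Set.ofList_eq_foldl]

-- B's reversed loop computes the first-occurrence dedup of the candidate list
theorem pvB_loop (fallback_map : List (String × Option String)) (empty_groups : List String) :
    ∀ (xs : List String),
    xs.foldr (fun group resolved =>
      let cand : Option String :=
        if group ∉ empty_groups then some group
        else
          match ((PySem.Dict.mk fallback_map).get? group).getD none with
          | some fb => if fb ≠ "" ∧ fb ∉ empty_groups then some fb else none
          | none => none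
      match cand with
      | none => resolved
      | some c => c :: resolved.filter (fun x => x != c)) []
    = PySem.Set.ofList (xs.filterMap (pvCand fallback_map empty_groups)) := by
  intro xs
  induction xs with
  | nil => rfl
  | cons g xs ih =>
    simp only [List.foldr_cons, List.filterMap_cons]
    cases hd : pvCand fallback_map empty_groups g with
    | none =>
      have : (if g ∉ empty_groups then some g
        else match ((PySem.Dict.mk fallback_map).get? g).getD none with
          | some fb => if fb ≠ "" ∧ fb ∉ empty_groups then some fb else none
          | none => none) = (none : Option String) := hd
      simp only [this, ih]
    | some c =>
      have : (if g ∉ empty_groups then some g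
        else match ((PySem.Dict.mk fallback_map).get? g).getD none with
          | some fb => if fb ≠ "" ∧ fb ∉ empty_groups then some fb else none
          | none => none) = some c := hd
      simp only [this, ih]
      rw [pv_ofList_cons, PySem.Set.ofList_eq_foldl, PySem.Set.ofList_eq_foldl,
        pv_filter_foldl c _ []]
      simp

-- ===== VERDICT (by name: the statement is the Claim_ definition above) =====
theorem resolve_groups_py_spec : Claim_equal_resolve_groups_py := by
  intro requested groups fallback_map empty_groups _
  unfold Spec_resolve_groups_py resolve_groups_py resolve_groups_py_alt
  rw [pvB_loop]
  refine Eq.trans (congrArg Prod.fst (pvA_loop fallback_map empty_groups requested PySem.Set.empty)) ?_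
  simp [PySem.Set.ofList_eq_foldl, PySem.Set.empty]
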